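-- pv_equiv track=rewrite | github.com/john-bankert/aif-django | aif_character/models.py | ability_score_mod
-- ===== SOURCE A (Python) =====
-- def ability_score_mod(ability):
--     if ability < 4:
--         return -3
--     elif ability < 6:
--         return -2
--     elif ability < 8:
--         return -1
--     elif ability < 14:
--         return 0
--     else:
--         i = 1
--         while ability > (13 + (i * 2)):
--             i += 1
--         return i
-- ===== SOURCE B (Python) =====
-- def ability_score_mod(ability):
--     # closed-form: clamp (ability-8)//2 to [-3,0] below 14, (ability-12)//2 at 14+
--     if ability >= 14:
--         return (ability - 12) // 2
--     return max(-3, min(0, (ability - 8) // 2))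
-- ===== Notes on version B (the rewrite author's own statement) =====
-- stated objective: faster
-- what changed: replaces the counting while-loop (and the if/elif ladder) by a closed-form floor-division formula with clamping
import Mathlib
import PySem

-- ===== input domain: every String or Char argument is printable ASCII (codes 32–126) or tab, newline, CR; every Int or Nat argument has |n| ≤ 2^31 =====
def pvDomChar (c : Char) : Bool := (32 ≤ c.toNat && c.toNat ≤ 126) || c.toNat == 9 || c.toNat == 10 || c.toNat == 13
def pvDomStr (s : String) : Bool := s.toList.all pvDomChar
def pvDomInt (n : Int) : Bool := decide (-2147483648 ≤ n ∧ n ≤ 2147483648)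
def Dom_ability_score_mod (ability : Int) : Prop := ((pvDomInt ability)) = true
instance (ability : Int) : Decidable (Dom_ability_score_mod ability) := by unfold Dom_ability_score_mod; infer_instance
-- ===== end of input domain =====

-- B replaces A's counting while-loop by a closed-form floor-division formula (O(1) vs O(ability)).

-- ===== PORT A =====
-- the while loop: i increments until ability ≤ 13 + i*2
def abilityLoopA (ability i : Int) : Int :=
  if ability > 13 + i * 2 then abilityLoopA ability (i + 1) else i
termination_by (ability - (13 + i * 2)).toNat
decreasing_by omega

def ability_score_mod (ability : Int) : Int :=
  if ability < 4 then -3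
  else if ability < 6 then -2
  else if ability < 8 then -1
  else if ability < 14 then 0
  else abilityLoopA ability 1

-- ===== PORT B =====
def ability_score_mod_alt (ability : Int) : Int :=
  if ability ≥ 14 then PySem.Int.floordiv (ability - 12) 2
  else max (-3) (min 0 (PySem.Int.floordiv (ability - 8) 2))

-- ===== PRECONDITION & SPEC =====
def Spec_ability_score_mod (ability : Int) (out : Int) : Prop := out = ability_score_mod_alt ability
instance (ability : Int) (out : Int) : Decidable (Spec_ability_score_mod ability out) := by unfold Spec_ability_score_mod; infer_instance

-- ===== CLAIM (what is proved, stated in full; the proofs are below) =====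
def Claim_equal_ability_score_mod : Prop := ∀ (ability : Int), Dom_ability_score_mod ability → Spec_ability_score_mod ability (ability_score_mod ability)

-- ===== LEMMAS AND PROOFS =====

-- the loop returns the least i with ability ≤ 13 + 2i, i.e. (ability - 12) // 2 given the entry invariant
theorem abilityLoopA_eq (ability i : Int) (h : 11 + 2 * i < ability) :
    abilityLoopA ability i = PySem.Int.floordiv (ability - 12) 2 := by
  unfold abilityLoopA
  split
  · exact abilityLoopA_eq ability (i + 1) (by omega)
  · symm
    rw [PySem.Int.floordiv_eq_iff_of_pos (by omega)]
    omega
termination_by (ability - (13 + i * 2)).toNat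
decreasing_by omega

-- ===== VERDICT (by name: the statement is the Claim_ definition above) =====
theorem ability_score_mod_spec : Claim_equal_ability_score_mod := by
  intro ability _
  unfold Spec_ability_score_mod ability_score_mod ability_score_mod_alt
  split_ifs <;>
    first
      | omega
      | rw [abilityLoopA_eq ability 1 (by omega)]
      | (rw [show PySem.Int.floordiv (ability - 8) 2 = (ability - 8) / 2 from
            PySem.Int.floordiv_eq_ediv_of_pos (by omega)]
         omega)
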